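-- pv_equiv track=rewrite | github.com/omarrsalif594/sibyl | sibyl/core/pipeline/template_engine.py | _is_simple_variable_access
-- ===== SOURCE A (Python) =====
-- def _is_simple_variable_access(template_str: str) -> bool:
--     """Check if template is a simple variable access like {{ var.path }}.
--
--     Args:
--         template_str: Template string
--
--     Returns:
--         True if simple variable access (no filters, operators, etc.)
--     """
--     stripped = template_str.strip()
--     if not (stripped.startswith("{{") and stripped.endswith("}}")):
--         return False
--
--     # Extract content between {{ }}
--     content = stripped[2:-2].strip()
--
--     # Check for filters, operators, or function calls
--     if any(char in content for char in ["|", "+", "-", "*", "/", "(", ")", "[", "]"]):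
--         return False
--
--     # Simple dotted path like "input.items" or "context.step1.result"
--     return True
-- ===== SOURCE B (Python) =====
-- def _is_simple_variable_access(template_str: str) -> bool:
--     """Check if template is a simple variable access like {{ var.path }}."""
--     s = template_str.strip()
--     n = len(s)
--     if n < 4:
--         return False
--     for i, ch in enumerate(s):
--         if i < 2:
--             if ch != "{":
--                 return False
--         elif i >= n - 2:
--             if ch != "}":
--                 return False
--         elif ch in "|+-*/()[]":
--             return False
--     return True
-- ===== Notes on version B (the rewrite author's own statement) =====
-- stated objective: alternative
-- what changed: A does staged passes (strip, startswith, endswith, slice out and re-strip the content, then one substring scan per special character); B makes a single position-classified pass over the stripped string, deciding per index whether the character must be '{', '}', or merely non-special, with no slicing and no per-character substring scans.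
import Mathlib
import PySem

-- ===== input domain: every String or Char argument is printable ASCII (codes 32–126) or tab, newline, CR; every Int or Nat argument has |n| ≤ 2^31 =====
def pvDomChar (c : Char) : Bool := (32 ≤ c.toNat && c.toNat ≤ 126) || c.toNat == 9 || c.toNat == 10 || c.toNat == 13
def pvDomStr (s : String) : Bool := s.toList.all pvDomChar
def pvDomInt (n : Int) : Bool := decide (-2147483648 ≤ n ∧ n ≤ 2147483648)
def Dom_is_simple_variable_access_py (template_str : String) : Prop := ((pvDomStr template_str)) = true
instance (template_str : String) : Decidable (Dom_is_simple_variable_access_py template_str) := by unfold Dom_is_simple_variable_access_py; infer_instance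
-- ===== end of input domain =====

-- B replaces A's staged passes (slice + per-special-character substring scans) by one
-- position-classified pass over the stripped string (objective: alternative).

-- ===== PORT A =====
def is_simple_variable_access_py (template_str : String) : Bool :=
  let stripped := PySem.Str.strip template_str
  if !(PySem.Str.startswith stripped "{{" && PySem.Str.endswith stripped "}}") then
    false
  else
    let content := PySem.Str.strip (PySem.Str.slice stripped (some 2) (some (-2)))
    if (["|", "+", "-", "*", "/", "(", ")", "[", "]"] : List String).any
        (fun ch => PySem.Str.isIn ch content) then
      false
    else
      true

-- ===== PORT B =====
-- `ch in "|+-*/()[]"` for a single character ch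
def pvForbidden (c : Char) : Bool :=
  c == '|' || c == '+' || c == '-' || c == '*' || c == '/' || c == '(' || c == ')' ||
    c == '[' || c == ']'

-- Source B's `for i, ch in enumerate(s)` loop with its early returns, as structural recursion
def pvAltLoop (n : Nat) : Nat → List Char → Bool
  | _, [] => true
  | i, c :: rest =>
    if i < 2 then
      if c ≠ '{' then false else pvAltLoop n (i + 1) rest
    else if n - 2 ≤ i then
      if c ≠ '}' then false else pvAltLoop n (i + 1) rest
    else if pvForbidden c then false
    else pvAltLoop n (i + 1) rest

def is_simple_variable_access_py_alt (template_str : String) : Bool :=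
  let l := (PySem.Str.strip template_str).toList
  let n := l.length
  if n < 4 then false else pvAltLoop n 0 l

-- ===== PRECONDITION & SPEC =====
def Spec_is_simple_variable_access_py (template_str : String) (out : Bool) : Prop := out = is_simple_variable_access_py_alt template_str
instance (template_str : String) (out : Bool) : Decidable (Spec_is_simple_variable_access_py template_str out) := by unfold Spec_is_simple_variable_access_py; infer_instance

-- ===== CLAIM (what is proved, stated in full; the proofs are below) =====
def Claim_equal_is_simple_variable_access_py : Prop := ∀ (template_str : String), Dom_is_simple_variable_access_py template_str → Spec_is_simple_variable_access_py template_str (is_simple_variable_access_py template_str)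

-- ===== LEMMAS AND PROOFS =====

-- membership in dropWhile is full membership for elements the predicate rejects
lemma mem_dropWhile_of_not {α : Type} {p : α → Bool} {x : α} (hx : p x = false) (l : List α) :
    x ∈ l.dropWhile p ↔ x ∈ l := by
  constructor
  · exact fun h => (List.dropWhile_sublist p).mem h
  · intro h
    rw [← List.takeWhile_append_dropWhile (p := p) (l := l), List.mem_append] at h
    rcases h with h | h
    · exact absurd (List.mem_takeWhile_imp h) (by simp [hx])
    · exact h

-- strip only removes whitespace, so membership of a non-space character is unchanged
lemma mem_strip_of_not_space {c : Char} (hc : PySem.Chars.isspace c = false) (m : List Char) :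
    c ∈ PySem.Chars.strip m ↔ c ∈ m := by
  simp [PySem.Chars.strip, PySem.Chars.rstrip, PySem.Chars.lstrip,
    mem_dropWhile_of_not hc, List.mem_reverse]

-- `c in strip m` for a single non-space character is plain membership in m
lemma isIn_singleton_strip {c : Char} (hc : PySem.Chars.isspace c = false) (m : List Char) :
    PySem.Chars.isIn [c] (PySem.Chars.strip m) = decide (c ∈ m) := by
  rw [Bool.eq_iff_iff]
  simp [PySem.Chars.isIn_iff_infix, List.singleton_infix_iff, mem_strip_of_not_space hc]

-- A's any-over-special-strings test on the stripped content equals a character-class scan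
lemma specials_any_eq (m : List Char) :
    ((["|", "+", "-", "*", "/", "(", ")", "[", "]"] : List String).any
      (fun ch => PySem.Chars.isIn ch.toList (PySem.Chars.strip m))) = m.any pvForbidden := by
  simp only [List.any_cons, List.any_nil, Bool.or_false]
  show (PySem.Chars.isIn ['|'] _ || (PySem.Chars.isIn ['+'] _ || (PySem.Chars.isIn ['-'] _ ||
    (PySem.Chars.isIn ['*'] _ || (PySem.Chars.isIn ['/'] _ || (PySem.Chars.isIn ['('] _ ||
    (PySem.Chars.isIn [')'] _ || (PySem.Chars.isIn ['['] _ || PySem.Chars.isIn [']'] _)))))))) = _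
  rw [isIn_singleton_strip (by decide), isIn_singleton_strip (by decide),
    isIn_singleton_strip (by decide), isIn_singleton_strip (by decide),
    isIn_singleton_strip (by decide), isIn_singleton_strip (by decide),
    isIn_singleton_strip (by decide), isIn_singleton_strip (by decide),
    isIn_singleton_strip (by decide)]
  rw [Bool.eq_iff_iff]
  simp [List.any_eq_true, pvForbidden]
  constructor
  · rintro (h | h | h | h | h | h | h | h | h) <;> exact ⟨_, h, by simp⟩
  · rintro ⟨c, hc, h⟩
    rcases h with (((((((h | h) | h) | h) | h) | h) | h) | h) | h <;> subst h <;> tauto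

-- characterization of pvAltLoop past the opening braces: the elements before the last two
-- must be non-special and the last (at most) two must be '}'
lemma pvAltLoop_char (l : List Char) : ∀ (i n : Nat), 2 ≤ i → n = i + l.length →
    pvAltLoop n i l = ((l.take (l.length - 2)).all (fun c => !pvForbidden c) &&
      (l.drop (l.length - 2)).all (fun c => c == '}')) := by
  induction l with
  | nil => intro i n _ _; simp [pvAltLoop]
  | cons c rest ih =>
    intro i n hi hn
    have hn' : n = i + rest.length + 1 := by
      simp only [List.length_cons] at hn; omega
    have hih : n = (i + 1) + rest.length := by omega
    rw [pvAltLoop]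
    rw [if_neg (by omega)]
    by_cases hr : rest.length ≤ 1
    · -- last (at most) two positions
      have hz : (c :: rest).length - 2 = 0 := by simp only [List.length_cons]; omega
      rw [if_pos (by omega), hz, List.take_zero, List.drop_zero]
      have hz' : rest.length - 2 = 0 := by omega
      by_cases hc : c = '}'
      · rw [if_neg (by simp [hc]), ih (i + 1) n (by omega) hih, hz',
          List.take_zero, List.drop_zero]
        simp [hc]
      · rw [if_pos (by simp [hc])]
        simp [hc]
    · -- interior position
      rw [if_neg (by omega)]
      have ht : (c :: rest).length - 2 = (rest.length - 2) + 1 := by simp; omega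
      rw [ht, List.take_succ_cons, List.drop_succ_cons]
      by_cases hc : pvForbidden c
      · simp [hc]
      · rw [if_neg (by simp [hc]), ih (i + 1) n (by omega) hih]
        simp [hc]

theorem is_simple_variable_access_py_spec' :
    ∀ (template_str : String),
      is_simple_variable_access_py template_str = is_simple_variable_access_py_alt template_str := by
  intro t
  simp only [is_simple_variable_access_py, is_simple_variable_access_py_alt,
    PySem.Str.startswith_eq, PySem.Str.endswith_eq, PySem.Str.isIn_eq, PySem.Str.toList_strip,
    PySem.Str.toList_slice, PySem.Chars.slice_eq_listSlice,
    show ("{{" : String).toList = ['{', '{'] from rfl,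
    show ("}}" : String).toList = ['}', '}'] from rfl]
  generalize PySem.Chars.strip t.toList = l
  by_cases h1 : ['{', '{'] <+: l
  · obtain ⟨rest, hrest⟩ := h1
    subst hrest
    simp only [List.cons_append, List.nil_append]
    have hsw : PySem.Chars.startswith ('{' :: '{' :: rest) ['{', '{'] = true :=
      (PySem.Chars.startswith_iff _ _).mpr ⟨rest, rfl⟩
    by_cases h2 : ['}', '}'] <:+ ('{' :: '{' :: rest)
    · -- main case: l = '{' :: '{' :: mid ++ "}}"
      obtain ⟨u, hu⟩ := h2
      rcases u with _ | ⟨a, _ | ⟨b, mid⟩⟩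
      · exact absurd hu (by simp)
      · exact absurd hu (by simp)
      · simp only [List.cons_append] at hu
        obtain ⟨ha, hu⟩ := List.cons_eq_cons.mp hu
        obtain ⟨hb, hmid⟩ := List.cons_eq_cons.mp hu
        subst ha hb hmid
        have hew : PySem.Chars.endswith ('{' :: '{' :: (mid ++ ['}', '}'])) ['}', '}'] = true :=
          (PySem.Chars.endswith_iff _ _).mpr ⟨'{' :: '{' :: mid, by simp⟩
        have hslice : PySem.List.slice ('{' :: '{' :: (mid ++ ['}', '}'])) (some 2) (some (-2))
            = mid := by simp [PySem.List.slice]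
        have hlen : ('{' :: '{' :: (mid ++ ['}', '}'])).length = mid.length + 4 := by simp
        have hloop : pvAltLoop (mid.length + 4) 0 ('{' :: '{' :: (mid ++ ['}', '}'])) =
            (mid.all (fun c => !pvForbidden c)) := by
          rw [pvAltLoop, if_pos (by omega), if_neg (by simp),
            pvAltLoop, if_pos (by omega), if_neg (by simp),
            pvAltLoop_char _ 2 (mid.length + 4) (by omega) (by simp only [List.length_append, List.length_cons, List.length_nil]; omega),
            show (mid ++ ['}', '}']).length - 2 = mid.length by simp,
            List.take_left, List.drop_left]
          simp
        have hall : mid.all (fun c => !pvForbidden c) = !(mid.any pvForbidden) := by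
          rw [← List.not_any_eq_all_not]
        simp only [hsw, hew, hslice, hlen, specials_any_eq, hloop, hall]
        rw [if_neg (show ¬ (mid.length + 4 < 4) by omega)]
        cases hany : mid.any pvForbidden <;> simp
    · -- no "}}" suffix: both sides false
      have hew : PySem.Chars.endswith ('{' :: '{' :: rest) ['}', '}'] = false := by
        rw [← Bool.not_eq_true, PySem.Chars.endswith_iff]; exact h2
      rw [hsw, hew]
      simp only [Bool.and_false, Bool.not_false, if_true]
      by_cases hn : ('{' :: '{' :: rest).length < 4
      · rw [if_pos hn]
      · rw [if_neg hn]
        have hr2 : 2 ≤ rest.length := by simp at hn; omega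
        rw [pvAltLoop, if_pos (by omega), if_neg (by simp),
          pvAltLoop, if_pos (by omega), if_neg (by simp),
          pvAltLoop_char rest 2 ('{' :: '{' :: rest).length (by omega) (by simp only [List.length_cons]; omega)]
        -- the trailing-two-'}' conjunct must fail, else "}}" would be a suffix
        suffices hY : (rest.drop (rest.length - 2)).all (fun c => c == '}') = false by
          rw [hY, Bool.and_false]
        by_contra hY
        rw [Bool.not_eq_false] at hY
        have hdlen : (rest.drop (rest.length - 2)).length = 2 := by
          rw [List.length_drop]; omega
        have hd : rest.drop (rest.length - 2) = ['}', '}'] := by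
          rcases hdd : rest.drop (rest.length - 2) with _ | ⟨a, _ | ⟨b, _ | _⟩⟩ <;>
            rw [hdd] at hdlen hY <;> simp_all
        exact h2 ((List.suffix_cons_iff.mpr (Or.inr (List.suffix_cons_iff.mpr
          (Or.inr (hd ▸ List.drop_suffix _ _))))))
  · -- no "{{" prefix: both sides false
    have hsw : PySem.Chars.startswith l ['{', '{'] = false := by
      rw [← Bool.not_eq_true, PySem.Chars.startswith_iff]; exact h1
    rw [hsw]
    simp only [Bool.false_and, Bool.not_false, if_true]
    rcases l with _ | ⟨c, _ | ⟨d, rest⟩⟩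
    · rw [if_pos (by simp)]
    · rw [if_pos (by simp)]
    · by_cases hc : c = '{'
      · by_cases hd : d = '{'
        · exact absurd ⟨rest, by simp [hc, hd]⟩ h1
        · by_cases hn : (c :: d :: rest).length < 4
          · rw [if_pos hn]
          · rw [if_neg hn, pvAltLoop, if_pos (by omega), if_neg (by simp [hc]),
              pvAltLoop, if_pos (by omega), if_pos (by simp [hd])]
      · by_cases hn : (c :: d :: rest).length < 4
        · rw [if_pos hn]
        · rw [if_neg hn, pvAltLoop, if_pos (by omega), if_pos (by simp [hc])]

-- ===== VERDICT (by name: the statement is the Claim_ definition above) =====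
theorem is_simple_variable_access_py_spec : Claim_equal_is_simple_variable_access_py := by
  intro t _
  unfold Spec_is_simple_variable_access_py
  exact is_simple_variable_access_py_spec' t
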